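-- pv_equiv track=rewrite | github.com/gdszyy/rusty-lake-orrery-game | Tools/validate_animation_sequences.py | _check_variant_design
-- ===== SOURCE A (Python) =====
-- from typing import Dict, List, Tuple
--
-- def _check_variant_design(frames: List[Tuple[int, str, str]], duplicates: List[int]) -> bool:
--     """
--     检查重复帧号是否为合理的多变体设计
--
--     Args:
--         frames: 帧列表
--         duplicates: 重复的帧号列表
--
--     Returns:
--         是否为合理的多变体设计
--     """
--     # 检查重复帧是否都有不同的后缀
--     for dup_num in duplicates:
--         dup_frames = [f for f in frames if f[0] == dup_num]
--         suffixes = [f[2] for f in dup_frames]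
--
--         # 如果所有重复帧都有非空且不同的后缀，则认为是合理的多变体设计
--         if all(suffixes) and len(suffixes) == len(set(suffixes)):
--             continue
--         else:
--             return False
--
--     return True
-- ===== SOURCE B (Python) =====
-- def _check_variant_design(frames, duplicates):
--     """Single-pass check: every frame whose number is duplicated must carry a
--     non-empty suffix not yet seen for that number."""
--     dup_set = set(duplicates)
--     seen = set()
--     for number, _prefix, suffix in frames:
--         if number in dup_set:
--             if not suffix:
--                 return False
--             key = (number, suffix)
--             if key in seen:
--                 return False
--             seen.add(key)
--     return True
-- ===== Notes on version B (the rewrite author's own statement) =====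
-- stated objective: alternative
-- what changed: Replaces A's per-duplicate rescan of frames (filter + all() + set-length check for each duplicate number) with one short-circuiting pass over frames that keeps a seen-set of (number, suffix) pairs, failing immediately on an empty or repeated suffix.
import Mathlib
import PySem

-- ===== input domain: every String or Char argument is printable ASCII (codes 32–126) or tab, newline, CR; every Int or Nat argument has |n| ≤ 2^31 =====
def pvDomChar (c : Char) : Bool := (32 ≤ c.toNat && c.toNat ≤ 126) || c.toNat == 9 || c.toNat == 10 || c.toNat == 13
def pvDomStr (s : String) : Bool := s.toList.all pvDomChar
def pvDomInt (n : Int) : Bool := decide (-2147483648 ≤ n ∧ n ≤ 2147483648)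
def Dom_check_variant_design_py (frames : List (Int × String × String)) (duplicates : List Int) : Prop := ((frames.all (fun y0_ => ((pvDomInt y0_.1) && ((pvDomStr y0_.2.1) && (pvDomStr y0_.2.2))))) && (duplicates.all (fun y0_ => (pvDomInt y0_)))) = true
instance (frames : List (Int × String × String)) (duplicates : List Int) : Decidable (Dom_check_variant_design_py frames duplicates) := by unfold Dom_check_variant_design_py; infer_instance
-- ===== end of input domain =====

-- B replaces A's per-duplicate rescan of frames with one short-circuiting pass over frames
-- keeping a seen-set of (number, suffix) pairs (alternative decomposition; fewer passes).

-- ===== PORT A =====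
-- A: for each dup_num in duplicates, collect the suffixes of frames with that number and
-- demand they are all non-empty (Python truthiness of str) and pairwise distinct (len == len(set)).
def aLoop (frames : List (Int × String × String)) : List Int → Bool
  | [] => true
  | d :: rest =>
    let dup_frames := frames.filter (fun f => f.1 == d)
    let suffixes := dup_frames.map (fun f => f.2.2)
    if suffixes.all (fun s => !(s == "")) && ((suffixes.length : Int) == PySem.Set.len (PySem.Set.ofList suffixes)) then
      aLoop frames rest
    else false

def check_variant_design_py (frames : List (Int × String × String)) (duplicates : List Int) : Bool :=
  aLoop frames duplicates

-- ===== PORT B =====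
-- B: single pass over frames maintaining `seen`, a set of (number, suffix) pairs of duplicated frames.
def bLoop (dup_set : PySem.Set Int) (seen : PySem.Set (Int × String)) : List (Int × String × String) → Bool
  | [] => true
  | f :: rest =>
    if dup_set.contains f.1 then
      if f.2.2 == "" then false
      else if seen.contains (f.1, f.2.2) then false
      else bLoop dup_set (seen.add (f.1, f.2.2)) rest
    else bLoop dup_set seen rest

def check_variant_design_py_alt (frames : List (Int × String × String)) (duplicates : List Int) : Bool :=
  bLoop (PySem.Set.ofList duplicates) PySem.Set.empty frames

-- ===== PRECONDITION & SPEC =====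
def Spec_check_variant_design_py (frames : List (Int × String × String)) (duplicates : List Int) (out : Bool) : Prop := out = check_variant_design_py_alt frames duplicates
instance (frames : List (Int × String × String)) (duplicates : List Int) (out : Bool) : Decidable (Spec_check_variant_design_py frames duplicates out) := by unfold Spec_check_variant_design_py; infer_instance

-- ===== CLAIM (what is proved, stated in full; the proofs are below) =====
def Claim_equal_check_variant_design_py : Prop := ∀ (frames : List (Int × String × String)) (duplicates : List Int), Dom_check_variant_design_py frames duplicates → Spec_check_variant_design_py frames duplicates (check_variant_design_py frames duplicates)

-- ===== LEMMAS AND PROOFS =====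

-- Python's 'len(xs) == len(set(xs))' is exactly Nodup.
lemma len_ofList_eq_iff (l : List String) :
    ((l.length : Int) = PySem.Set.len (PySem.Set.ofList l)) ↔ l.Nodup := by
  have hlen : PySem.Set.len (PySem.Set.ofList l) = ((PySem.Set.ofList l).length : Int) := by
    simp [PySem.Set.len]
  rw [hlen]
  constructor
  · intro h
    have hl : (PySem.Set.ofList l).length = l.length := by exact_mod_cast h.symm
    have hcard : (PySem.Set.ofList l).length = l.toFinset.card := by
      rw [← List.toFinset_card_of_nodup (PySem.Set.nodup_ofList l)]
      congr 1
      ext x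
      simp [PySem.Set.mem_ofList]
    have hfin : l.toFinset.card = l.length := by rw [← hcard, hl]
    have := (Multiset.toFinset_card_eq_card_iff_nodup (m := (l : Multiset String))).mp
      (by simpa using hfin)
    simpa using this
  · intro h
    rw [PySem.Set.ofList_eq_self_of_nodup l h]

-- Characterisation of A's loop.
lemma aLoop_char (frames : List (Int × String × String)) :
    ∀ dups : List Int, aLoop frames dups = true ↔
      ∀ d ∈ dups,
        (∀ s ∈ (frames.filter (fun f => f.1 == d)).map (fun f => f.2.2), s ≠ "") ∧
        ((frames.filter (fun f => f.1 == d)).map (fun f => f.2.2)).Nodup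
  | [] => by simp [aLoop]
  | d :: rest => by
    simp only [aLoop]
    split
    next hc =>
      rw [aLoop_char frames rest]
      simp only [Bool.and_eq_true, List.all_eq_true, beq_iff_eq, Bool.not_eq_true',
        beq_eq_false_iff_ne] at hc
      have hd := (len_ofList_eq_iff _).mp hc.2
      constructor
      · intro h x hx
        rcases List.mem_cons.mp hx with rfl | hx'
        · exact ⟨hc.1, hd⟩
        · exact h x hx'
      · intro h x hx
        exact h x (List.mem_cons_of_mem _ hx)
    next hc =>
      simp only [Bool.and_eq_true, List.all_eq_true, beq_iff_eq, Bool.not_eq_true',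
        beq_eq_false_iff_ne, not_and] at hc
      constructor
      · intro h; cases h
      · intro h
        have := h d List.mem_cons_self
        exact absurd ((len_ofList_eq_iff _).mpr this.2) (hc this.1)

-- Characterisation of B's loop, generalised over `seen`.
lemma bLoop_char (ds : PySem.Set Int) :
    ∀ (l : List (Int × String × String)) (seen : PySem.Set (Int × String)),
      bLoop ds seen l = true ↔
        ((∀ f ∈ l, ds.contains f.1 = true → f.2.2 ≠ "") ∧
         ((l.filter (fun f => ds.contains f.1)).map (fun f => (f.1, f.2.2))).Nodup ∧
         (∀ k ∈ (l.filter (fun f => ds.contains f.1)).map (fun f => (f.1, f.2.2)), k ∉ seen))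
  | [], seen => by simp [bLoop]
  | f :: rest, seen => by
    simp only [bLoop]
    by_cases hmem : ds.contains f.1 = true
    · have hfc : (f :: rest).filter (fun g => ds.contains g.1)
          = f :: rest.filter (fun g => ds.contains g.1) := by
        simp only [List.filter_cons, hmem, if_pos]
      rw [if_pos hmem]
      by_cases hemp : (f.2.2 == "") = true
      · rw [if_pos hemp]
        simp only [beq_iff_eq] at hemp
        constructor
        · intro h; cases h
        · intro h
          exact absurd hemp (h.1 f List.mem_cons_self hmem)
      · rw [if_neg hemp]
        simp only [beq_iff_eq] at hemp
        by_cases hseen : seen.contains (f.1, f.2.2) = true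
        · rw [if_pos hseen]
          have hs : (f.1, f.2.2) ∈ seen := (PySem.Set.contains_iff seen _).mp hseen
          have hkmem : (f.1, f.2.2) ∈
              ((f :: rest).filter (fun g => ds.contains g.1)).map (fun g => (g.1, g.2.2)) := by
            rw [hfc, List.map_cons]
            exact List.mem_cons_self
          constructor
          · intro h; cases h
          · intro h
            exact absurd hs (h.2.2 (f.1, f.2.2) hkmem)
        · rw [if_neg hseen]
          have hns : (f.1, f.2.2) ∉ seen := fun h => hseen ((PySem.Set.contains_iff seen _).mpr h)
          rw [bLoop_char ds rest (seen.add (f.1, f.2.2)), hfc, List.map_cons,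
            List.forall_mem_cons, List.nodup_cons, List.forall_mem_cons]
          simp only [PySem.Set.mem_add]
          constructor
          · rintro ⟨hne, hnd, hnotin⟩
            exact ⟨⟨fun _ => hemp, hne⟩,
              ⟨fun hmem' => (hnotin _ hmem' (Or.inr rfl)), hnd⟩,
              hns, fun k hk hkin => (hnotin k hk) (Or.inl hkin)⟩
          · rintro ⟨⟨_, hne⟩, ⟨hnotk, hnd⟩, _, hnotin⟩
            refine ⟨hne, hnd, fun k hk hor => ?_⟩
            rcases hor with hkseen | rfl
            · exact hnotin k hk hkseen
            · exact hnotk hk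
    · have hfc : (f :: rest).filter (fun g => ds.contains g.1)
          = rest.filter (fun g => ds.contains g.1) := by
        have hni : f.1 ∉ ds := fun h => hmem ((PySem.Set.contains_iff ds f.1).mpr h)
        simp [hni]
      rw [if_neg hmem, bLoop_char ds rest seen, hfc, List.forall_mem_cons]
      constructor
      · rintro ⟨hne, hnd, hnotin⟩
        exact ⟨⟨fun h => absurd h hmem, hne⟩, hnd, hnotin⟩
      · rintro ⟨⟨_, hne⟩, hnd, hnotin⟩
        exact ⟨hne, hnd, hnotin⟩

-- The two Nodup conditions agree: per-number suffix distinctness over the duplicated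
-- numbers is exactly distinctness of the (number, suffix) keys of duplicated frames.
lemma nodup_bridge (frames : List (Int × String × String)) (duplicates : List Int) :
    (∀ d ∈ duplicates,
        ((frames.filter (fun f => f.1 == d)).map (fun f => f.2.2)).Nodup) ↔
      ((frames.filter (fun f => (PySem.Set.ofList duplicates).contains f.1)).map
        (fun f => (f.1, f.2.2))).Nodup := by
  have hc : ∀ x : Int, (PySem.Set.ofList duplicates).contains x = true ↔ x ∈ duplicates := by
    intro x
    rw [PySem.Set.contains_iff]
    exact PySem.Set.mem_ofList duplicates x
  simp only [List.Nodup]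
  simp only [List.pairwise_map]
  simp only [List.pairwise_filter]
  simp only [List.pairwise_iff_getElem]
  simp only [beq_iff_eq]
  constructor
  · intro h i j hi hj hij hci hcj hpair
    have h1 : frames[i].1 = frames[j].1 := congrArg (fun p : Int × String => p.1) hpair
    have h2 : frames[i].2.2 = frames[j].2.2 := congrArg (fun p : Int × String => p.2) hpair
    exact h frames[i].1 ((hc _).mp hci) i j hi hj hij rfl h1.symm h2
  · intro h d hd i j hi hj hij hdi hdj heq
    have hci : (PySem.Set.ofList duplicates).contains frames[i].1 = true := by
      rw [hc, hdi]; exact hd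
    have hcj : (PySem.Set.ofList duplicates).contains frames[j].1 = true := by
      rw [hc, hdj]; exact hd
    exact h i j hi hj hij hci hcj (Prod.ext (by rw [hdi, hdj]) heq)

-- The two non-empty-suffix conditions agree.
lemma nonempty_bridge (frames : List (Int × String × String)) (duplicates : List Int) :
    (∀ d ∈ duplicates,
        ∀ s ∈ (frames.filter (fun f => f.1 == d)).map (fun f => f.2.2), s ≠ "") ↔
      (∀ f ∈ frames, (PySem.Set.ofList duplicates).contains f.1 = true → f.2.2 ≠ "") := by
  have hc : ∀ x : Int, (PySem.Set.ofList duplicates).contains x = true ↔ x ∈ duplicates := by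
    intro x
    rw [PySem.Set.contains_iff]
    exact PySem.Set.mem_ofList duplicates x
  simp only [List.mem_map, List.mem_filter, beq_iff_eq]
  constructor
  · intro h f hf hcf
    exact h f.1 ((hc _).mp hcf) f.2.2 ⟨f, ⟨hf, rfl⟩, rfl⟩
  · rintro h d hd s ⟨f, ⟨hf, hfd⟩, rfl⟩
    exact h f hf (by rw [hc, hfd]; exact hd)

-- ===== VERDICT (by name: the statement is the Claim_ definition above) =====
theorem check_variant_design_py_spec : Claim_equal_check_variant_design_py := by
  intro frames duplicates _
  unfold Spec_check_variant_design_py check_variant_design_py check_variant_design_py_alt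
  rw [Bool.eq_iff_iff, aLoop_char, bLoop_char]
  constructor
  · intro h
    refine ⟨(nonempty_bridge frames duplicates).mp (fun d hd => (h d hd).1),
      (nodup_bridge frames duplicates).mp (fun d hd => (h d hd).2),
      fun k _ hk => ?_⟩
    simp [PySem.Set.empty] at hk
  · rintro ⟨hne, hnd, _⟩ d hd
    exact ⟨(nonempty_bridge frames duplicates).mpr hne d hd,
      (nodup_bridge frames duplicates).mpr hnd d hd⟩
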